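-- pv_equiv track=rewrite | github.com/Gillingham-Lab/ChemProfileSeq | chemProfileLib/helpers/cigar.py | remove_softclipping
-- ===== SOURCE A (Python) =====
-- def remove_softclipping(read, cigar):
--     pos = 0
--     buf = ""
--     new_read = ""
--     new_cigar = ""
--
--     for char in cigar:
--         if char in "0123456789":
--             buf += char
--             continue
--
--         length = int(buf)
--
--         if char != "S":
--             if char != "N":
--                 new_read += read[pos:pos+length]
--             new_cigar += buf + char
--
--         if char != "N":
--             pos += length
--         buf = ""
--
--     return new_read, new_cigar
-- ===== SOURCE B (Python) =====
-- def remove_softclipping(read, cigar):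
--     # Pass 1: tokenize the CIGAR into (digit-run, op) pairs.
--     tokens = []
--     i = 0
--     n = len(cigar)
--     while i < n:
--         j = i
--         while j < n and cigar[j] in "0123456789":
--             j += 1
--         if j == n:
--             break  # trailing digits with no op are ignored
--         tokens.append((cigar[i:j], cigar[j]))
--         i = j + 1
--
--     # Pass 2: dispatch on the op of each token.
--     pos = 0
--     read_parts = []
--     cigar_parts = []
--     for buf, op in tokens:
--         length = int(buf)
--         if op == "S":
--             pos += length
--         elif op == "N":
--             cigar_parts.append(buf + op)
--         else:
--             read_parts.append(read[pos:pos + length])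
--             cigar_parts.append(buf + op)
--             pos += length
--
--     return "".join(read_parts), "".join(cigar_parts)
-- ===== Notes on version B (the rewrite author's own statement) =====
-- stated objective: alternative
-- what changed: A fuses digit parsing and emission in one char-by-char loop over the CIGAR with string +=; B first tokenizes the CIGAR into (digit-run, op) pairs and then dispatches over the token list, accumulating parts in lists joined once at the end.
import Mathlib
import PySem

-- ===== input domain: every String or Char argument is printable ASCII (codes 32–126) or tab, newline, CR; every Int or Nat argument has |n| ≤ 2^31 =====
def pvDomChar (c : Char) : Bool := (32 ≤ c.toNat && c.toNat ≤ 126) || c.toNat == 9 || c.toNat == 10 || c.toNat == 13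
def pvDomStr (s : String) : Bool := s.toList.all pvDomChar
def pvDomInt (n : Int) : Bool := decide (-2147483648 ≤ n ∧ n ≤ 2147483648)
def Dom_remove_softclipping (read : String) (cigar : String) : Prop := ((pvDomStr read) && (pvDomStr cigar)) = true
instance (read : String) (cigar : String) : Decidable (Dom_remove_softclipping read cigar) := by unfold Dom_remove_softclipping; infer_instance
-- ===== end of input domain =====

-- B re-decomposes A's fused char-by-char parse/emit loop into a tokenize pass plus a
-- dispatch loop over (digit-run, op) tokens accumulating list parts joined at the end
-- (objective: alternative decomposition, same cost); return values agree on Pre_.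

-- ===== PORT A =====
-- the digit test `char in "0123456789"` shared by both Pythons
def pvIsDig (c : Char) : Bool := ("0123456789".toList).contains c

-- one iteration of A's `for char in cigar` loop; state = (pos, buf, new_read, new_cigar)
def aStep (read : List Char) (st : Int × List Char × List Char × List Char) (c : Char) :
    Int × List Char × List Char × List Char :=
  let (pos, buf, nr, nc) := st
  if pvIsDig c then (pos, buf ++ [c], nr, nc)
  else
    -- `int(buf)`: raises (ValueError) when buf is empty — excluded by Pre_
    let length : Int := (PySem.Int.ofChars? buf).getD 0
    let nrnc :=
      if c ≠ 'S' then
        (if c ≠ 'N' then nr ++ PySem.List.slice read (some pos) (some (pos + length)) else nr,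
         nc ++ buf ++ [c])
      else (nr, nc)
    let pos' := if c ≠ 'N' then pos + length else pos
    (pos', [], nrnc.1, nrnc.2)

def remove_softclipping (read : String) (cigar : String) : String × String :=
  let st := cigar.toList.foldl (aStep read.toList) (0, [], [], [])
  (String.ofList st.2.2.1, String.ofList st.2.2.2)

-- ===== PORT B =====
-- pass 1 of Source B: split the CIGAR into (digit-run, op) tokens; trailing digits dropped
def bTokenize (cs : List Char) : List (List Char × Char) :=
  match h : cs.dropWhile pvIsDig with
  | [] => []
  | op :: t => (cs.takeWhile pvIsDig, op) :: bTokenize t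
termination_by cs.length
decreasing_by
  have h1 : (cs.dropWhile pvIsDig).length ≤ cs.length := List.length_dropWhile_le _ _
  rw [h] at h1; simp at h1 ⊢; omega

-- pass 2 of Source B: dispatch on each token's op, accumulating read/cigar parts
def bLoop (read : List Char) (pos : Int) (rps cps : List (List Char)) :
    List (List Char × Char) → Int × List (List Char) × List (List Char)
  | [] => (pos, rps, cps)
  | (buf, op) :: ts =>
    let length : Int := (PySem.Int.ofChars? buf).getD 0   -- int(buf); empty buf excluded by Pre_
    if op = 'S' then bLoop read (pos + length) rps cps ts
    else if op = 'N' then bLoop read pos rps (cps ++ [buf ++ [op]]) ts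
    else bLoop read (pos + length)
           (rps ++ [PySem.List.slice read (some pos) (some (pos + length))])
           (cps ++ [buf ++ [op]]) ts

def remove_softclipping_alt (read : String) (cigar : String) : String × String :=
  let r := bLoop read.toList 0 [] [] (bTokenize cigar.toList)
  (String.ofList r.2.1.flatten, String.ofList r.2.2.flatten)   -- "".join(parts)

-- ===== PRECONDITION & SPEC =====
-- Pre_ excludes exactly the malformed CIGARs (a non-digit at position 0 or right after
-- another non-digit), on which both Pythons raise ValueError from int('').
def Pre_remove_softclipping (read : String) (cigar : String) : Prop :=
  pvIsDig (cigar.toList.headD '0') = true ∧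
  (cigar.toList.zip cigar.toList.tail).all (fun p => pvIsDig p.1 || pvIsDig p.2) = true
instance (read : String) (cigar : String) : Decidable (Pre_remove_softclipping read cigar) := by
  unfold Pre_remove_softclipping; infer_instance

def pvWitness_remove_softclipping : String × String := ("ACGTACGT", "2S3M1N2M")

def Spec_remove_softclipping (read : String) (cigar : String) (out : String × String) : Prop :=
  out = remove_softclipping_alt read cigar
instance (read : String) (cigar : String) (out : String × String) :
    Decidable (Spec_remove_softclipping read cigar out) := by
  unfold Spec_remove_softclipping; infer_instance

-- ===== CLAIM (what is proved, stated in full; the proofs are below) =====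
def Claim_equal_remove_softclipping : Prop :=
  ∀ (read : String) (cigar : String), Dom_remove_softclipping read cigar →
    Pre_remove_softclipping read cigar →
    Spec_remove_softclipping read cigar (remove_softclipping read cigar)

-- ===== LEMMAS AND PROOFS =====

-- mid-scan tokenization: like bTokenize but with a pending digit prefix `buf`
def toks (buf : List Char) (cs : List Char) : List (List Char × Char) :=
  match cs.dropWhile pvIsDig with
  | [] => []
  | op :: t => (buf ++ cs.takeWhile pvIsDig, op) :: bTokenize t

theorem bTokenize_eq (cs : List Char) : bTokenize cs = toks [] cs := by
  rw [bTokenize, toks]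
  rcases h : cs.dropWhile pvIsDig with _ | ⟨op, t⟩ <;> simp

-- accumulator lemma for bLoop
theorem bLoop_acc (read : List Char) (ts : List (List Char × Char)) :
    ∀ (pos : Int) (rps cps : List (List Char)),
      bLoop read pos rps cps ts =
        ((bLoop read pos [] [] ts).1,
         rps ++ (bLoop read pos [] [] ts).2.1,
         cps ++ (bLoop read pos [] [] ts).2.2) := by
  induction ts with
  | nil => intro pos rps cps; simp [bLoop]
  | cons t ts ih =>
    obtain ⟨buf, op⟩ := t
    intro pos rps cps
    simp only [bLoop]
    set length : Int := (PySem.Int.ofChars? buf).getD 0 with hlength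
    by_cases hS : op = 'S'
    · simp only [if_pos hS]
      rw [ih (pos + length) rps cps]
    · by_cases hN : op = 'N'
      · simp only [if_neg hS, if_pos hN]
        rw [ih pos rps (cps ++ [buf ++ [op]]), ih pos [] (([] : List (List Char)) ++ [buf ++ [op]])]
        simp
      · simp only [if_neg hS, if_neg hN]
        rw [ih (pos + length) (rps ++ [PySem.List.slice read (some pos) (some (pos + length))]) (cps ++ [buf ++ [op]]),
            ih (pos + length) (([] : List (List Char)) ++ [PySem.List.slice read (some pos) (some (pos + length))]) (([] : List (List Char)) ++ [buf ++ [op]])]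
        simp

-- A's loop just accumulates a run of digits into buf
theorem foldA_digits (read : List Char) (ds : List Char) (hd : ∀ c ∈ ds, pvIsDig c = true) :
    ∀ (cs : List Char) (pos : Int) (buf nr nc : List Char),
      (ds ++ cs).foldl (aStep read) (pos, buf, nr, nc) =
        cs.foldl (aStep read) (pos, buf ++ ds, nr, nc) := by
  induction ds with
  | nil => intro cs pos buf nr nc; simp
  | cons d ds ih =>
    intro cs pos buf nr nc
    have hdd : pvIsDig d = true := hd d (by simp)
    simp only [List.cons_append, List.foldl_cons]
    rw [show aStep read (pos, buf, nr, nc) d = (pos, buf ++ [d], nr, nc) by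
      simp [aStep, hdd]]
    rw [ih (fun c hc => hd c (by simp [hc]))]
    simp

-- head of a non-empty dropWhile fails the predicate
theorem dropWhile_head_false {p : Char → Bool} :
    ∀ {cs : List Char} {op : Char} {t : List Char}, cs.dropWhile p = op :: t → p op = false := by
  intro cs
  induction cs with
  | nil => intro op t h; simp at h
  | cons a as ih =>
    intro op t h
    by_cases ha : p a
    · rw [List.dropWhile_cons_of_pos ha] at h; exact ih h
    · rw [List.dropWhile_cons_of_neg ha] at h
      cases h; simpa using ha

-- main invariant: A's fold from mid-scan state equals B's loop over the remaining tokens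
theorem main_lemma (read : List Char) :
    ∀ (n : Nat) (cs : List Char), cs.length ≤ n →
      ∀ (pos : Int) (buf nr nc : List Char),
        ((cs.foldl (aStep read) (pos, buf, nr, nc)).2.2.1 =
            nr ++ (bLoop read pos [] [] (toks buf cs)).2.1.flatten) ∧
        ((cs.foldl (aStep read) (pos, buf, nr, nc)).2.2.2 =
            nc ++ (bLoop read pos [] [] (toks buf cs)).2.2.flatten) := by
  intro n
  induction n with
  | zero =>
    intro cs hcs pos buf nr nc
    have : cs = [] := List.eq_nil_of_length_eq_zero (Nat.le_zero.mp hcs)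
    subst this; simp [toks, bLoop]
  | succ n ih =>
    intro cs hcs pos buf nr nc
    have hsplit : cs.takeWhile pvIsDig ++ cs.dropWhile pvIsDig = cs :=
      List.takeWhile_append_dropWhile
    rcases h : cs.dropWhile pvIsDig with _ | ⟨op, t⟩
    · -- all digits: both sides emit nothing
      rw [h] at hsplit; simp at hsplit
      have hfold := foldA_digits read cs hsplit [] pos buf nr nc
      simp only [List.append_nil, List.foldl_nil] at hfold
      rw [hfold]
      simp [toks, h, bLoop]
    · -- a token (buf ++ digits, op) followed by t
      have hop : pvIsDig op = false := dropWhile_head_false h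
      have hdig : ∀ c ∈ cs.takeWhile pvIsDig, pvIsDig c = true :=
        fun c hc => List.mem_takeWhile_imp hc
      have hlen : t.length ≤ n := by
        have h1 := List.length_dropWhile_le pvIsDig cs
        rw [h] at h1; simp at h1; omega
      set B := buf ++ cs.takeWhile pvIsDig with hB
      have htoks : toks buf cs = (B, op) :: bTokenize t := by rw [toks, h]
      have hfold : List.foldl (aStep read) (pos, buf, nr, nc) cs
          = List.foldl (aStep read) (aStep read (pos, B, nr, nc) op) t := by
        conv_lhs => rw [← hsplit, h]
        rw [foldA_digits read _ hdig, List.foldl_cons]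
      rw [htoks, hfold]
      by_cases hS : op = 'S'
      · subst hS
        have hop' : aStep read (pos, B, nr, nc) 'S'
            = (pos + (PySem.Int.ofChars? B).getD 0, [], nr, nc) := by
          simp [aStep, (by decide : pvIsDig 'S' = false)]
        have hbl : bLoop read pos [] [] ((B, 'S') :: bTokenize t)
            = bLoop read (pos + (PySem.Int.ofChars? B).getD 0) [] [] (bTokenize t) := by
          simp [bLoop]
        rw [hop', hbl]
        have := ih t hlen (pos + (PySem.Int.ofChars? B).getD 0) [] nr nc
        rw [← bTokenize_eq] at this
        exact this
      · by_cases hN : op = 'N'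
        · subst hN
          have hop' : aStep read (pos, B, nr, nc) 'N'
              = (pos, [], nr, nc ++ B ++ ['N']) := by
            simp [aStep, (by decide : pvIsDig 'N' = false)]
          have hbl : bLoop read pos [] [] ((B, 'N') :: bTokenize t)
              = bLoop read pos [] [B ++ ['N']] (bTokenize t) := by
            simp [bLoop]
          rw [hop', hbl, bLoop_acc read (bTokenize t) pos [] [B ++ ['N']]]
          have := ih t hlen pos [] nr (nc ++ B ++ ['N'])
          rw [← bTokenize_eq] at this
          constructor
          · rw [this.1]; simp
          · rw [this.2]; simp
        · have hop' : aStep read (pos, B, nr, nc) op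
              = (pos + (PySem.Int.ofChars? B).getD 0, [],
                 nr ++ PySem.List.slice read (some pos) (some (pos + (PySem.Int.ofChars? B).getD 0)),
                 nc ++ B ++ [op]) := by
            simp [aStep, hop, hS, hN]
          have hbl : bLoop read pos [] [] ((B, op) :: bTokenize t)
              = bLoop read (pos + (PySem.Int.ofChars? B).getD 0)
                  [PySem.List.slice read (some pos) (some (pos + (PySem.Int.ofChars? B).getD 0))]
                  [B ++ [op]] (bTokenize t) := by
            simp [bLoop, hS, hN]
          rw [hop', hbl, bLoop_acc read (bTokenize t) (pos + (PySem.Int.ofChars? B).getD 0)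
                [PySem.List.slice read (some pos) (some (pos + (PySem.Int.ofChars? B).getD 0))]
                [B ++ [op]]]
          have := ih t hlen (pos + (PySem.Int.ofChars? B).getD 0) []
                    (nr ++ PySem.List.slice read (some pos) (some (pos + (PySem.Int.ofChars? B).getD 0)))
                    (nc ++ B ++ [op])
          rw [← bTokenize_eq] at this
          constructor
          · rw [this.1]; simp
          · rw [this.2]; simp

-- ===== VERDICT (by name: the statement is the Claim_ definition above) =====
theorem remove_softclipping_spec : Claim_equal_remove_softclipping := by
  intro read cigar _ _
  unfold Spec_remove_softclipping remove_softclipping remove_softclipping_alt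
  have := main_lemma read.toList cigar.toList.length cigar.toList (le_refl _) 0 [] [] []
  rw [bTokenize_eq]
  simp only [List.nil_append] at this
  dsimp only
  rw [this.1, this.2]
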